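-- pv_equiv track=rewrite | github.com/ahmedwael19/ds-practice-2025 | orchestrator/src/app.py | merge_clocks
-- ===== SOURCE A (Python) =====
-- def merge_clocks(clock1, clock2):
--     """
--     Merge two vector clocks by taking the maximum value for each component.
--     Ensures proper type conversion to handle mixed string/integer values.
--
--     Args:
--         clock1: First vector clock dictionary
--         clock2: Second vector clock dictionary
--
--     Returns:
--         dict: Merged vector clock dictionary
--     """
--     merged = {}
--     all_keys = set(clock1.keys()).union(set(clock2.keys()))
--
--     for key in all_keys:
--         # Get values with defaults, ensuring both are integers
--         val1 = int(clock1.get(key, 0)) if clock1.get(key, 0) is not None else 0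
--         val2 = int(clock2.get(key, 0)) if clock2.get(key, 0) is not None else 0
--         merged[key] = max(val1, val2)
--
--     return merged
-- ===== SOURCE B (Python) =====
-- def merge_clocks(clock1, clock2):
--     """Component-wise max of two vector clocks.
--
--     Different decomposition: instead of building the union of the key sets and
--     looking both values up per key, tabulate a dict of value PAIRS (left, right)
--     -- one streaming pass per input dict, missing sides defaulting to 0 -- and
--     then take the max of each pair in a final comprehension.
--     """
--     pairs = {}
--     for k, v in clock1.items():
--         pairs[k] = (0 if v is None else int(v), 0)
--     for k, v in clock2.items():
--         left = pairs[k][0] if k in pairs else 0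
--         pairs[k] = (left, 0 if v is None else int(v))
--     return {k: (a if a > b else b) for k, (a, b) in pairs.items()}
-- ===== Notes on version B (the rewrite author's own statement) =====
-- stated objective: alternative
-- what changed: A unions the two key sets and looks up both values per union key; B never forms a key union: it tabulates an intermediate dict of (left, right) value pairs by one streaming pass over each input dict (missing side defaulting to 0) and takes the max of each pair in a final comprehension.
import Mathlib
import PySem

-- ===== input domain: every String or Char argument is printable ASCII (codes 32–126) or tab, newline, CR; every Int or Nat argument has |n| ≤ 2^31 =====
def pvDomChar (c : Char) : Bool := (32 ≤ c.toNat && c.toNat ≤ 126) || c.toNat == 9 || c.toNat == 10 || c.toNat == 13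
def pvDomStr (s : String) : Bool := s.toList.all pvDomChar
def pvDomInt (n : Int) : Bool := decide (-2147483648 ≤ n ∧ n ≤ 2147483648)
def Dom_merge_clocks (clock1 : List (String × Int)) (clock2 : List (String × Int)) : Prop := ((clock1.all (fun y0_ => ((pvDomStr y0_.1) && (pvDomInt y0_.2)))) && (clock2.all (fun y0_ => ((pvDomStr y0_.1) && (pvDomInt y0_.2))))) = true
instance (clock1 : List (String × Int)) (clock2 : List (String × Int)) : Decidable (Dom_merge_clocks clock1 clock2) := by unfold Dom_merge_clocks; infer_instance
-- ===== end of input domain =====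

-- B replaces A's key-set union + per-key double lookup by a tabulated dict of (left, right)
-- value pairs (one streaming pass per input dict) whose maxima are taken at the end; same values, same cost.
-- The dict parameters arrive as association lists; both ports normalise them with PySem.Dict.ofList (Python dict semantics).
-- Values are Int, so `v is None` is always false and `int(v)` is the identity in both ports.

-- ===== PORT A =====
def merge_clocks (clock1 : List (String × Int)) (clock2 : List (String × Int)) : List (String × Int) :=
  let d1 := PySem.Dict.ofList clock1
  let d2 := PySem.Dict.ofList clock2
  -- all_keys = set(clock1.keys()).union(set(clock2.keys()))
  let allKeys : PySem.Set String :=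
    PySem.Set.union (PySem.Set.ofList d1.keys) (PySem.Set.ofList d2.keys)
  -- for key in all_keys: merged[key] = max(val1, val2)
  (allKeys.foldl
    (fun merged key => merged.insert key (max (d1.getD key 0) (d2.getD key 0)))
    PySem.Dict.empty).items

-- ===== PORT B =====
-- left = pairs[k][0] if k in pairs else 0   (the lookup is guarded by 'k in pairs', so getD is exact)
def pvLeft (m : PySem.Dict String (Int × Int)) (k : String) : Int :=
  if m.contains k then (m.getD k (0, 0)).1 else 0

def merge_clocks_alt (clock1 : List (String × Int)) (clock2 : List (String × Int)) : List (String × Int) :=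
  let d1 := PySem.Dict.ofList clock1
  let d2 := PySem.Dict.ofList clock2
  -- for k, v in clock1.items(): pairs[k] = (int(v), 0)
  let pairs := d1.items.foldl (fun m kv => m.insert kv.1 (kv.2, (0 : Int))) PySem.Dict.empty
  -- for k, v in clock2.items(): left = pairs[k][0] if k in pairs else 0; pairs[k] = (left, int(v))
  let pairs2 := d2.items.foldl
    (fun m kv => m.insert kv.1 (pvLeft m kv.1, kv.2)) pairs
  -- return {k: (a if a > b else b) for k, (a, b) in pairs.items()}
  pairs2.items.map (fun p => (p.1, if p.2.1 > p.2.2 then p.2.1 else p.2.2))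

-- ===== PRECONDITION & SPEC =====
def Spec_merge_clocks (clock1 : List (String × Int)) (clock2 : List (String × Int)) (out : List (String × Int)) : Prop := out = merge_clocks_alt clock1 clock2
instance (clock1 : List (String × Int)) (clock2 : List (String × Int)) (out : List (String × Int)) : Decidable (Spec_merge_clocks clock1 clock2 out) := by unfold Spec_merge_clocks; infer_instance

-- ===== CLAIM (what is proved, stated in full; the proofs are below) =====
def Claim_equal_merge_clocks : Prop := ∀ (clock1 : List (String × Int)) (clock2 : List (String × Int)), Dom_merge_clocks clock1 clock2 → Spec_merge_clocks clock1 clock2 (merge_clocks clock1 clock2)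

-- ===== LEMMAS AND PROOFS =====

-- B's second loop only ever reads the accumulator at the key it is about to insert; since the
-- streamed keys are distinct, that read always sees the INITIAL accumulator.
lemma pass2_lookup_base :
    ∀ (l : List (String × Int)) (m0 : PySem.Dict String (Int × Int)), (l.map Prod.fst).Nodup →
    l.foldl (fun m kv => m.insert kv.1 (pvLeft m kv.1, kv.2)) m0
      = l.foldl (fun m kv => m.insert kv.1 (pvLeft m0 kv.1, kv.2)) m0 := by
  intro l
  induction l with
  | nil => intro m0 _; rfl
  | cons kv t ih =>
    intro m0 hnd
    simp only [List.map_cons, List.nodup_cons] at hnd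
    obtain ⟨hk, hndt⟩ := hnd
    simp only [List.foldl_cons]
    rw [ih _ hndt]
    apply PySem.List.foldl_congr_mem
    intro acc x hx
    have hne : x.1 ≠ kv.1 := fun h => hk (h ▸ List.mem_map_of_mem hx)
    simp [pvLeft, PySem.Dict.contains_insert, PySem.Dict.getD_insert, hne]

-- Items after folding value-insertions keyed by a pure function over a distinct key list:
-- keys already present are overwritten in place, fresh keys are appended in stream order.
lemma items_foldl_insert_keyfun {ν : Type} (G : String → ν) :
    ∀ (l : List String) (m0 : PySem.Dict String ν), l.Nodup → m0.keys.Nodup →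
    (l.foldl (fun m k => m.insert k (G k)) m0).items
      = m0.items.map (fun p => if p.1 ∈ l then (p.1, G p.1) else p)
        ++ (l.filter (fun k => !(m0.contains k))).map (fun k => (k, G k)) := by
  intro l
  induction l with
  | nil => intro m0 _ _; simp
  | cons k t ih =>
    intro m0 hnd hm
    have hndt : t.Nodup := hnd.of_cons
    have hkt : k ∉ t := (List.nodup_cons.mp hnd).1
    have hmnd : (m0.insert k (G k)).keys.Nodup := PySem.Dict.nodup_keys_insert _ _ _ hm
    simp only [List.foldl_cons]
    rw [ih _ hndt hmnd]
    by_cases hc : m0.contains k = true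
    · rw [PySem.Dict.items_insert_of_contains m0 (G k) hc, List.map_map]
      have hfun : ((fun p => if p.1 ∈ t then (p.1, G p.1) else p) ∘
            (fun p : String × ν => if p.1 == k then (k, G k) else p))
          = fun p => if p.1 ∈ (k :: t) then (p.1, G p.1) else p := by
        funext p
        by_cases hpk : p.1 = k
        · simp [Function.comp, hpk, hkt]
        · simp [Function.comp, hpk]
      rw [hfun]
      have hfil : t.filter (fun x => !((m0.insert k (G k)).contains x))
          = t.filter (fun x => !(m0.contains x)) := by
        apply List.filter_congr
        intro x hx
        have hne : x ≠ k := fun h => hkt (h ▸ hx)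
        rw [PySem.Dict.contains_insert]
        simp [hne]
      rw [hfil]
      simp [hc]
    · have hc' : m0.contains k = false := by simpa using hc
      rw [PySem.Dict.items_insert_of_not_contains m0 (G k) hc', List.map_append]
      have hknm : k ∉ m0.keys := by
        have := PySem.Dict.contains_eq_decide_mem_keys (d := m0) (k := k)
        rw [hc'] at this
        simpa using this.symm
      have hmap : m0.items.map (fun p => if p.1 ∈ t then (p.1, G p.1) else p)
          = m0.items.map (fun p => if p.1 ∈ (k :: t) then (p.1, G p.1) else p) := by
        apply List.map_congr_left
        intro p hp
        have hpk : p.1 ≠ k := by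
          intro h
          exact hknm (h ▸ List.mem_map_of_mem hp)
        simp [hpk]
      have hfil : t.filter (fun x => !((m0.insert k (G k)).contains x))
          = t.filter (fun x => !(m0.contains x)) := by
        apply List.filter_congr
        intro x hx
        have hne : x ≠ k := fun h => hkt (h ▸ hx)
        rw [PySem.Dict.contains_insert]
        simp [hne]
      rw [hfil, hmap]
      simp [hc']

-- the Python conditional expression 'a if a > b else b' is max
lemma ite_gt_eq_max (a b : Int) : (if a > b then a else b) = max a b := by
  split <;> omega

-- ===== VERDICT (by name: the statement is the Claim_ definition above) =====
theorem merge_clocks_spec : Claim_equal_merge_clocks := by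
  intro clock1 clock2 _
  unfold Spec_merge_clocks
  simp only [merge_clocks, merge_clocks_alt]
  set d1 := PySem.Dict.ofList clock1 with hd1
  set d2 := PySem.Dict.ofList clock2 with hd2
  have h1 : d1.keys.Nodup := PySem.Dict.nodup_keys_ofList clock1
  have h2 : d2.keys.Nodup := PySem.Dict.nodup_keys_ofList clock2
  -- A's key list is clock1's keys followed by the clock2-only keys
  have hunion : PySem.Set.union (PySem.Set.ofList d1.keys) (PySem.Set.ofList d2.keys)
      = d1.keys ++ (d2.keys.filter (fun k => !(PySem.Set.contains d1.keys k))) := by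
    show PySem.Set.update (PySem.Set.ofList d1.keys) (PySem.Set.ofList d2.keys)
      = d1.keys ++ (d2.keys.filter (fun k => !(PySem.Set.contains d1.keys k)))
    rw [PySem.Set.ofList_eq_self_of_nodup _ h1, PySem.Set.update_eq_append_filter,
        PySem.Set.ofList_ofList, PySem.Set.ofList_eq_self_of_nodup _ h2]
  have hUnodup : (PySem.Set.union (PySem.Set.ofList d1.keys) (PySem.Set.ofList d2.keys)).Nodup :=
    PySem.Set.nodup_union _ _ (PySem.Set.nodup_ofList _)
  -- A's loop: all keys fresh and distinct, so the items are a map over the key list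
  have hA : ((PySem.Set.union (PySem.Set.ofList d1.keys) (PySem.Set.ofList d2.keys)).foldl
      (fun merged key => merged.insert key (max (d1.getD key 0) (d2.getD key 0)))
      PySem.Dict.empty).items
      = (PySem.Set.union (PySem.Set.ofList d1.keys) (PySem.Set.ofList d2.keys)).map
          (fun k => (k, max (d1.getD k 0) (d2.getD k 0))) := by
    rw [PySem.Dict.items_foldl_insert_fresh _ (fun x => x) _ _
      (fun a _ => PySem.Dict.contains_empty a) (by simpa using hUnodup)]
    simp [PySem.Dict.empty]
  -- B's first pass: a table of (value-from-clock1, 0) pairs in clock1 order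
  set p1 := d1.items.foldl (fun m kv => m.insert kv.1 (kv.2, (0 : Int))) PySem.Dict.empty with hp1def
  have hp1 : p1.items = d1.items.map (fun kv => (kv.1, (kv.2, (0 : Int)))) := by
    rw [hp1def, PySem.Dict.items_foldl_insert_fresh _ Prod.fst _ _
      (fun a _ => PySem.Dict.contains_empty a.1) (by simpa using h1)]
    simp [PySem.Dict.empty]
  have hp1keys : p1.keys = d1.keys := by
    simp only [PySem.Dict.keys, hp1, List.map_map]
    rfl
  have hp1nd : p1.keys.Nodup := hp1keys ▸ h1
  -- what B's guarded lookup into the pair table returns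
  have hpv : ∀ kv, kv ∈ d1.items → pvLeft p1 kv.1 = kv.2 := by
    intro kv hkv
    obtain ⟨a, b⟩ := kv
    have hmem : (a, (b, (0 : Int))) ∈ p1.items := by
      rw [hp1]; exact List.mem_map_of_mem hkv
    have hsome : p1.get? a = some (b, 0) := PySem.Dict.get?_of_mem_items p1 hmem hp1nd
    simp [pvLeft, PySem.Dict.contains_eq_isSome_get?, hsome, PySem.Dict.getD_eq_get?_getD]
  have hpv' : ∀ k, k ∉ d1.keys → pvLeft p1 k = 0 := by
    intro k hk
    have hnone : p1.get? k = none :=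
      (PySem.Dict.get?_eq_none_iff_not_mem_keys p1 k).mpr (hp1keys ▸ hk)
    simp [pvLeft, PySem.Dict.contains_eq_isSome_get?, hnone]
  -- B's second pass, step 1: the accumulator lookups all see p1
  rw [hA, hunion, pass2_lookup_base _ _ (by simpa using h2)]
  -- step 2: the streamed value kv.2 is d2.getD kv.1 0, making the fold body a pure key function
  have hcongr : d2.items.foldl (fun m kv => m.insert kv.1 (pvLeft p1 kv.1, kv.2)) p1
      = d2.items.foldl (fun m kv => m.insert kv.1 (pvLeft p1 kv.1, d2.getD kv.1 0)) p1 := by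
    apply PySem.List.foldl_congr_mem
    intro acc kv hkv
    obtain ⟨a, b⟩ := kv
    rw [PySem.Dict.getD_of_mem_items d2 hkv h2]
  rw [hcongr]
  -- step 3: a fold over d2.items touching only keys IS a fold over d2.keys
  have hkeysfold : d2.items.foldl (fun m kv => m.insert kv.1 (pvLeft p1 kv.1, d2.getD kv.1 0)) p1
      = d2.keys.foldl (fun m k => m.insert k (pvLeft p1 k, d2.getD k 0)) p1 := by
    show _ = (d2.items.map Prod.fst).foldl _ p1
    rw [List.foldl_map]
  rw [hkeysfold, items_foldl_insert_keyfun _ _ _ h2 hp1nd, hp1,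
      PySem.Dict.items_eq_map_keys d1 h1 0]
  simp only [List.map_append, List.map_map]
  -- compare the two chunks: clock1's keys, then the clock2-only keys
  congr 1
  · -- first chunk: both are maps over d1's keys
    apply List.map_congr_left
    intro k hk
    have hmem : (k, d1.getD k 0) ∈ d1.items := by
      rw [PySem.Dict.items_eq_map_keys d1 h1 0]
      exact List.mem_map_of_mem hk
    by_cases hk2 : k ∈ d2.keys
    · have hl := hpv _ hmem
      simp only [Function.comp_apply, hk2, if_pos, hl]
      simp [ite_gt_eq_max]
    · have hc2 : d2.contains k = false := by
        have := PySem.Dict.contains_eq_decide_mem_keys (d := d2) (k := k)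
        simp [hk2] at this
        exact this
      have hz : d2.getD k 0 = 0 := PySem.Dict.getD_of_not_contains d2 0 hc2
      simp only [Function.comp_apply, hk2, if_false]
      simp [hz, ite_gt_eq_max]
  · -- second chunk: same filtered key list, and the pair there is (0, clock2's value)
    have hfil : d2.keys.filter (fun k => !(p1.contains k))
        = d2.keys.filter (fun k => !(PySem.Set.contains d1.keys k)) := by
      apply List.filter_congr
      intro k _
      rw [PySem.Dict.contains_eq_decide_mem_keys, hp1keys, PySem.Set.contains_eq_listContains]
      simp
    rw [hfil]
    apply List.map_congr_left
    intro k hk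
    have hk1 : k ∉ d1.keys := by
      have := (List.mem_filter.mp hk).2
      simpa [PySem.Set.contains_eq_listContains, List.contains_iff_mem] using this
    have hl := hpv' k hk1
    have hz : d1.getD k 0 = 0 := by
      rw [PySem.Dict.getD_eq_get?_getD, (PySem.Dict.get?_eq_none_iff_not_mem_keys d1 k).mpr hk1]
      rfl
    simp [hl, hz, ite_gt_eq_max]
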